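-- pv_equiv track=rewrite | github.com/muthiazs/Dasar-Pemograman | TUGAS BESAR KELOMPOK 18.py | hargatiket
-- ===== SOURCE A (Python) =====
-- def isEmptyLOL(S):
--     return S == []
--
-- def firstList(S):
--     if isinstance(S, list):
--         return S[0]
--     else:
--         return S
--
-- def tailList(S):
--     return S[1:]
--
-- def hargatiket(L):
--     if isEmptyLOL(L):
--         return 0
--     else:
--         if firstList(L) <= 1 :
--             return (0 + hargatiket(tailList(L)))
--         elif firstList(L) > 1 and firstList(L) <= 5:
--             return (50000 + hargatiket(tailList(L)))
--         elif firstList(L) > 5 and firstList(L) <= 12: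
--             return (75000 + hargatiket(tailList(L)))
--         else:
--             return (100000 + hargatiket(tailList(L)))
-- ===== SOURCE B (Python) =====
-- def hargatiket(L):
--     total = 0
--     for age in L:
--         if age <= 1:
--             total += 0
--         elif age <= 5:
--             total += 50000
--         elif age <= 12:
--             total += 75000
--         else:
--             total += 100000
--     return total
-- ===== Notes on version B (the rewrite author's own statement) =====
-- stated objective: idiomatic
-- what changed: Replaced the recursive head/tail decomposition (with isEmptyLOL/firstList/tailList helpers and O(n) list slicing per step) by a single flat iterative loop accumulating the total.
import Mathlib
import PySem

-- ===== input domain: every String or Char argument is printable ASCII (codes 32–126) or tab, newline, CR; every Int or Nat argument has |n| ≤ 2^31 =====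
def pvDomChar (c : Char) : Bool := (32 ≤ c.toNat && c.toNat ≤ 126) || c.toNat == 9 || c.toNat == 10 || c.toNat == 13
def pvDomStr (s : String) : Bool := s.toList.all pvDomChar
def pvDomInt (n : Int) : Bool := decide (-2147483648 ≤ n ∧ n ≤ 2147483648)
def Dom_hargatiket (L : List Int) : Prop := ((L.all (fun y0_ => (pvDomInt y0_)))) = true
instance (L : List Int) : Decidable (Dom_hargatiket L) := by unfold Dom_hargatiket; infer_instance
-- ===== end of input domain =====

-- B replaces A's recursive head/tail decomposition with a flat iterative accumulation loop (idiomatic).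

-- ===== PORT A =====
def isEmptyLOL (S : List Int) : Bool := S == []

-- firstList: on a List Int argument the isinstance branch is taken; S[0] via pyGet? (L is nonempty at every call site)
def firstList (S : List Int) : Int := (PySem.List.pyGet? S 0).getD 0

def tailList (S : List Int) : List Int := PySem.List.slice S (some 1) none

def hargatiket (L : List Int) : Int :=
  if isEmptyLOL L then 0
  else
    if firstList L ≤ 1 then 0 + hargatiket (tailList L)
    else if firstList L > 1 ∧ firstList L ≤ 5 then 50000 + hargatiket (tailList L)
    else if firstList L > 5 ∧ firstList L ≤ 12 then 75000 + hargatiket (tailList L)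
    else 100000 + hargatiket (tailList L)
termination_by L.length
decreasing_by
  all_goals
    simp_all [isEmptyLOL, tailList, PySem.List.slice_from_one]
    cases L with
    | nil => simp_all
    | cons a t => simp

-- ===== PORT B =====
def hargatiket_alt (L : List Int) : Int :=
  L.foldl (fun total age =>
    if age ≤ 1 then total + 0
    else if age ≤ 5 then total + 50000
    else if age ≤ 12 then total + 75000
    else total + 100000) 0

-- ===== PRECONDITION & SPEC =====
def Spec_hargatiket (L : List Int) (out : Int) : Prop := out = hargatiket_alt L
instance (L : List Int) (out : Int) : Decidable (Spec_hargatiket L out) := by unfold Spec_hargatiket; infer_instance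

-- ===== CLAIM (what is proved, stated in full; the proofs are below) =====
def Claim_equal_hargatiket : Prop := ∀ (L : List Int), Dom_hargatiket L → Spec_hargatiket L (hargatiket L)

-- ===== LEMMAS AND PROOFS =====
def step (total age : Int) : Int :=
  if age ≤ 1 then total + 0
  else if age ≤ 5 then total + 50000
  else if age ≤ 12 then total + 75000
  else total + 100000

theorem alt_shift (L : List Int) (c : Int) : L.foldl step c = c + L.foldl step 0 := by
  induction L generalizing c with
  | nil => simp
  | cons a t ih =>
    simp only [List.foldl_cons]
    rw [ih (step c a), ih (step 0 a)]
    simp [step]; split_ifs <;> ring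

theorem harga_eq (L : List Int) : hargatiket L = hargatiket_alt L := by
  induction L with
  | nil => simp [hargatiket, hargatiket_alt, isEmptyLOL]
  | cons a t ih =>
    rw [hargatiket]
    have ht : tailList (a :: t) = t := by
      simp [tailList, PySem.List.slice_from_one]
    have hf : firstList (a :: t) = a := by
      simp [firstList]
    have halt : hargatiket_alt (a :: t) = step 0 a + hargatiket_alt t := by
      simp only [hargatiket_alt, List.foldl_cons]
      exact alt_shift t (step 0 a)
    simp only [isEmptyLOL, ht, hf, ih, halt, step]
    split_ifs with h1 h2 h3 <;> simp_all

-- ===== VERDICT (by name: the statement is the Claim_ definition above) =====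
theorem hargatiket_spec : Claim_equal_hargatiket := by
  intro L _
  exact harga_eq L
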